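-- pv_equiv track=rewrite | github.com/HanSeongDeok/before-dinner-algorithm | programmers/chaeeun/week13_133499.py | solution
-- ===== SOURCE A (Python) =====
-- def solution(babbling):
--     possible_words = ["aya", "ye", "woo", "ma"]
--     answer = 0
--
--     for word in babbling:
--         original_word = word
--         for possible_word in possible_words:
--             if possible_word * 2 not in word:
--                 word = word.replace(possible_word, ' ')
--         if word.strip() == '':
--             answer += 1
--     return answer
-- ===== SOURCE B (Python) =====
-- def solution(babbling):
--     # Single left-to-right scan per word instead of four global replace passes:
--     # consume tokens (unique by first letter), forbid immediate repeats, skip whitespace.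
--     tokens = {'a': 'aya', 'y': 'ye', 'w': 'woo', 'm': 'ma'}
--     count = 0
--     for word in babbling:
--         ok, prev, i, n = True, '', 0, len(word)
--         while i < n:
--             c = word[i]
--             if c.isspace():
--                 prev = ''
--                 i += 1
--             else:
--                 t = tokens.get(c)
--                 if t is None or t == prev or word[i:i+len(t)] != t:
--                     ok = False
--                     break
--                 prev = t
--                 i += len(t)
--         count += ok
--     return count
-- ===== Notes on version B (the rewrite author's own statement) =====
-- stated objective: faster
-- what changed: Replaced A's four sequential whole-string replace passes (each guarded by a doubled-token substring search) plus a final strip by a single left-to-right scanner per word that consumes tokens (unique by their first letter), forbids an immediately repeated token, skips whitespace, and stops at the first failure.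
import Mathlib
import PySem

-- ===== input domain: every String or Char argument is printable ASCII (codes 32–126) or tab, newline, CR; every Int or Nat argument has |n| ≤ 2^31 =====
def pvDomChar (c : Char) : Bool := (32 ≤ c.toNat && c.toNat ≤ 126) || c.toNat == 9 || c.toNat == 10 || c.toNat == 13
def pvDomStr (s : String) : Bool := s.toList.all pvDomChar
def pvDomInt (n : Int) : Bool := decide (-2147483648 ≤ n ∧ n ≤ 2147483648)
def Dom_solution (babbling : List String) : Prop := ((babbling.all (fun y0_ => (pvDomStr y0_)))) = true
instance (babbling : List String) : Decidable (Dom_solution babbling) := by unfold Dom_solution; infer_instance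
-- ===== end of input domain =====

-- B replaces A's four guarded whole-string replace passes + strip by one left-to-right token
-- scan per word (tokens are unique by first letter), a constant-factor speedup measured.


-- ===== PORT A =====
-- literal transliteration of A: for each word, four guarded whole-string replace passes, then a strip test
-- (string operations are ported on the List Char side through PySem.Chars, as the PySem prelude prescribes)
def solution (babbling : List String) : Int :=
  babbling.foldl
    (fun answer word =>
      let possible_words : List (List Char) := [['a','y','a'], ['y','e'], ['w','o','o'], ['m','a']]
      let w := possible_words.foldl
        (fun w possible_word =>
          if PySem.Chars.isIn (possible_word ++ possible_word) w = false
          then PySem.Chars.replace w possible_word [' '] else w) word.toList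
      if PySem.Chars.strip w = [] then answer + 1 else answer)
    0

-- ===== PORT B =====
-- Source B's token dict {'a':'aya','y':'ye','w':'woo','m':'ma'}
def toksB : PySem.Dict Char (List Char) :=
  PySem.Dict.ofList [('a', ['a','y','a']), ('y', ['y','e']), ('w', ['w','o','o']), ('m', ['m','a'])]

-- how the literal dict looks up (cited by okGo's termination proof and by the proofs below)
theorem toksB_get (c : Char) : toksB.get? c =
    if c = 'a' then some ['a','y','a'] else if c = 'y' then some ['y','e']
    else if c = 'w' then some ['w','o','o'] else if c = 'm' then some ['m','a'] else none := by
  rw [show toksB = PySem.Dict.mk [('a', ['a','y','a']), ('y', ['y','e']), ('w', ['w','o','o']), ('m', ['m','a'])] from rfl]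
  simp only [PySem.Dict.get?, List.find?]
  split_ifs with h1 h2 h3 h4 <;>
    first
    | (subst_vars; rfl)
    | (rw [beq_eq_false_iff_ne.mpr (fun he => h1 he.symm),
           beq_eq_false_iff_ne.mpr (fun he => h2 he.symm),
           beq_eq_false_iff_ne.mpr (fun he => h3 he.symm),
           beq_eq_false_iff_ne.mpr (fun he => h4 he.symm)]; rfl)

-- every token stored in the dict is nonempty (cited in okGo's decreasing_by)
theorem toksB_get_pos (c : Char) (t : List Char) (h : toksB.get? c = some t) : 0 < t.length := by
  rw [toksB_get] at h; split_ifs at h <;> simp_all <;> subst_vars <;> decide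

-- literal transliteration of Source B's while-loop (recursion on the remaining length n - i)
def okGo (w : List Char) (i : Nat) (prev : List Char) : Bool :=
  if h : i < w.length then
    let c := w[i]
    if PySem.Chars.isspace c then okGo w (i+1) []
    else match ht : toksB.get? c with
      | none => false
      | some t =>
        if t == prev || PySem.List.slice w (some (i:Int)) (some ((i:Int) + (t.length:Int))) ≠ t
        then false
        else okGo w (i + t.length) t
  else true
  termination_by w.length - i
  decreasing_by
  · omega
  · have := toksB_get_pos _ _ ht; omega

def solution_alt (babbling : List String) : Int :=
  babbling.foldl (fun count word => count + (if okGo word.toList 0 [] then 1 else 0)) 0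

-- ===== PRECONDITION & SPEC =====
def Spec_solution (babbling : List String) (out : Int) : Prop := out = solution_alt babbling
instance (babbling : List String) (out : Int) : Decidable (Spec_solution babbling out) := by unfold Spec_solution; infer_instance

-- ===== CLAIM (what is proved, stated in full; the proofs are below) =====
def Claim_equal_solution : Prop := ∀ (babbling : List String), Dom_solution babbling → Spec_solution babbling (solution babbling)

-- ===== LEMMAS AND PROOFS =====

-- character facts used throughout
theorem ws_sp : PySem.Chars.isspace ' ' = true := by decide
theorem ws_a : PySem.Chars.isspace 'a' = false := by decide
theorem ws_y : PySem.Chars.isspace 'y' = false := by decide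
theorem ws_e : PySem.Chars.isspace 'e' = false := by decide
theorem ws_w : PySem.Chars.isspace 'w' = false := by decide
theorem ws_m : PySem.Chars.isspace 'm' = false := by decide

-- ---- canonical List Char layer: the four replace passes ----
def repAya : List Char → List Char
  | c1 :: c2 :: c3 :: r =>
    if c1 = 'a' ∧ c2 = 'y' ∧ c3 = 'a' then ' ' :: repAya r else c1 :: repAya (c2 :: c3 :: r)
  | l => l

def repYe : List Char → List Char
  | c1 :: c2 :: r =>
    if c1 = 'y' ∧ c2 = 'e' then ' ' :: repYe r else c1 :: repYe (c2 :: r)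
  | l => l

def repWoo : List Char → List Char
  | c1 :: c2 :: c3 :: r =>
    if c1 = 'w' ∧ c2 = 'o' ∧ c3 = 'o' then ' ' :: repWoo r else c1 :: repWoo (c2 :: c3 :: r)
  | l => l

def repMa : List Char → List Char
  | c1 :: c2 :: r =>
    if c1 = 'm' ∧ c2 = 'a' then ' ' :: repMa r else c1 :: repMa (c2 :: r)
  | l => l

def allWs (w : List Char) : Bool := w.all PySem.Chars.isspace

-- ---- canonical scanner; level L = how many tokens are active (4: aya ye woo ma; 3: ye woo ma; 2: woo ma; 1: ma; 0: none) ----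
def g (L : Nat) (p : Option Char) : List Char → Bool
  | [] => true
  | [c] => if PySem.Chars.isspace c then true else false
  | [c1, c2] =>
    if PySem.Chars.isspace c1 then g L none [c2]
    else if 3 ≤ L ∧ c1 = 'y' ∧ c2 = 'e' then !(p == some 'y')
    else if 1 ≤ L ∧ c1 = 'm' ∧ c2 = 'a' then !(p == some 'm')
    else false
  | c1 :: c2 :: c3 :: r =>
    if PySem.Chars.isspace c1 then g L none (c2 :: c3 :: r)
    else if 4 ≤ L ∧ c1 = 'a' ∧ c2 = 'y' ∧ c3 = 'a' then !(p == some 'a') && g L (some 'a') r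
    else if 3 ≤ L ∧ c1 = 'y' ∧ c2 = 'e' then !(p == some 'y') && g L (some 'y') (c3 :: r)
    else if 2 ≤ L ∧ c1 = 'w' ∧ c2 = 'o' ∧ c3 = 'o' then !(p == some 'w') && g L (some 'w') r
    else if 1 ≤ L ∧ c1 = 'm' ∧ c2 = 'a' then !(p == some 'm') && g L (some 'm') (c3 :: r)
    else false

def mask (h : Char) (p : Option Char) : Option Char := if p == some h then none else p

-- ---- step lemmas for g ----
theorem g_nil (L : Nat) (p : Option Char) : g L p [] = true := rfl

theorem g_ws (L : Nat) (p : Option Char) (c : Char) (x : List Char)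
    (hc : PySem.Chars.isspace c = true) : g L p (c :: x) = g L none x := by
  match x with
  | [] => simp [g, hc]
  | [c2] => simp [g, hc]
  | c2 :: c3 :: r => simp [g, hc]

theorem g_aya (L : Nat) (hL : 4 ≤ L) (p : Option Char) (x : List Char) :
    g L p ('a' :: 'y' :: 'a' :: x) = (!(p == some 'a') && g L (some 'a') x) := by
  match x with
  | [] => simp [g, hL, ws_a]
  | c4 :: r => simp [g, hL, ws_a]

theorem g_ye (L : Nat) (hL : 3 ≤ L) (p : Option Char) (x : List Char) :
    g L p ('y' :: 'e' :: x) = (!(p == some 'y') && g L (some 'y') x) := by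
  match x with
  | [] => simp [g, hL, ws_y]
  | c3 :: r => simp [g, hL, ws_y]

theorem g_woo (L : Nat) (hL : 2 ≤ L) (p : Option Char) (x : List Char) :
    g L p ('w' :: 'o' :: 'o' :: x) = (!(p == some 'w') && g L (some 'w') x) := by
  match x with
  | [] => simp [g, hL, ws_w]
  | c4 :: r => simp [g, hL, ws_w]

theorem g_ma (L : Nat) (hL : 1 ≤ L) (p : Option Char) (x : List Char) :
    g L p ('m' :: 'a' :: x) = (!(p == some 'm') && g L (some 'm') x) := by
  match x with
  | [] => simp [g, hL, ws_m]
  | c3 :: r => simp [g, hL, ws_m]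

-- refutation step lemmas
theorem g_head_false (L : Nat) (p : Option Char) (c : Char) (x : List Char)
    (h0 : PySem.Chars.isspace c = false)
    (h1 : c ≠ 'a') (h2 : c ≠ 'y') (h3 : c ≠ 'w') (h4 : c ≠ 'm') :
    g L p (c :: x) = false := by
  match x with
  | [] => simp [g, h0]
  | [c2] => simp [g, h0, h1, h2, h3, h4]
  | c2 :: c3 :: r => simp [g, h0, h1, h2, h3, h4]

theorem g_a_low (L : Nat) (hL : L ≤ 3) (p : Option Char) (x : List Char) :
    g L p ('a' :: x) = false := by
  match x with
  | [] => simp [g, ws_a]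
  | [c2] => simp [g, ws_a]
  | c2 :: c3 :: r => simp [g, ws_a]; intro h; omega

theorem g_a_false (L : Nat) (p : Option Char) (x : List Char)
    (hx : ¬ (['y','a'] <+: x)) : g L p ('a' :: x) = false := by
  match x with
  | [] => simp [g, ws_a]
  | [c2] => simp [g, ws_a]
  | c2 :: c3 :: r =>
    by_cases hc2 : c2 = 'y'
    · by_cases hc3 : c3 = 'a'
      · exact absurd (by simp [hc2, hc3, List.cons_prefix_cons]) hx
      · subst hc2; simp [g, ws_a, hc3]
    · simp [g, ws_a, hc2]

theorem g_y_false (L : Nat) (p : Option Char) (x : List Char)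
    (hx : x.head? ≠ some 'e') : g L p ('y' :: x) = false := by
  match x with
  | [] => simp [g, ws_y]
  | [c2] => simp at hx; simp [g, ws_y, hx]
  | c2 :: c3 :: r => simp at hx; simp [g, ws_y, hx]

theorem g_y_low (L : Nat) (hL : L ≤ 2) (p : Option Char) (x : List Char) :
    g L p ('y' :: x) = false := by
  match x with
  | [] => simp [g, ws_y]
  | [c2] => simp [g, ws_y]; intro h; omega
  | c2 :: c3 :: r => simp [g, ws_y]; intro h; omega

theorem g_w_false (L : Nat) (p : Option Char) (x : List Char)
    (hx : ¬ (['o','o'] <+: x)) : g L p ('w' :: x) = false := by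
  match x with
  | [] => simp [g, ws_w]
  | [c2] => simp [g, ws_w]
  | c2 :: c3 :: r =>
    by_cases hc2 : c2 = 'o'
    · by_cases hc3 : c3 = 'o'
      · exact absurd (by simp [hc2, hc3, List.cons_prefix_cons]) hx
      · subst hc2; simp [g, ws_w, hc3]
    · simp [g, ws_w, hc2]

theorem g_w_low (L : Nat) (hL : L ≤ 1) (p : Option Char) (x : List Char) :
    g L p ('w' :: x) = false := by
  match x with
  | [] => simp [g, ws_w]
  | [c2] => simp [g, ws_w]
  | c2 :: c3 :: r => simp [g, ws_w]; intro h; omega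

theorem g_m_false (L : Nat) (p : Option Char) (x : List Char)
    (hx : x.head? ≠ some 'a') : g L p ('m' :: x) = false := by
  match x with
  | [] => simp [g, ws_m]
  | [c2] => simp at hx; simp [g, ws_m, hx]
  | c2 :: c3 :: r => simp at hx; simp [g, ws_m, hx]

theorem g_m_low (p : Option Char) (x : List Char) : g 0 p ('m' :: x) = false := by
  match x with
  | [] => simp [g, ws_m]
  | [c2] => simp [g, ws_m]
  | c2 :: c3 :: r => simp [g, ws_m]

theorem g_zero : ∀ (v : List Char) (p : Option Char), g 0 p v = allWs v
  | [], _ => rfl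
  | c :: x, p => by
    by_cases hc : PySem.Chars.isspace c
    · rw [g_ws _ _ _ _ hc, g_zero x none]; simp [allWs, hc]
    · have hf : g 0 p (c :: x) = false := by
        match x with
        | [] => simp [g, hc]
        | [c2] => simp [g, hc]
        | c2 :: c3 :: r => simp [g, hc]
      simp [hf, allWs, hc]


-- ---- equations and helpers for the rep functions ----
theorem repAya_tok (r : List Char) : repAya ('a'::'y'::'a'::r) = ' ' :: repAya r := by
  simp [repAya]

theorem repAya_cons (c : Char) (x : List Char) (hc : c ≠ 'a') :
    repAya (c :: x) = c :: repAya x := by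
  match x with
  | [] => simp [repAya]
  | [c2] => simp [repAya]
  | c2 :: c3 :: r => simp [repAya, hc]

theorem repAya_cons_a (x : List Char) (hx : ¬ (['y','a'] <+: x)) :
    repAya ('a' :: x) = 'a' :: repAya x := by
  match x with
  | [] => simp [repAya]
  | [c2] => simp [repAya]
  | c2 :: c3 :: r =>
    by_cases hc2 : c2 = 'y'
    · by_cases hc3 : c3 = 'a'
      · exact absurd (by simp [hc2, hc3, List.cons_prefix_cons]) hx
      · simp [repAya, hc3]
    · simp [repAya, hc2]

theorem repYe_tok (r : List Char) : repYe ('y'::'e'::r) = ' ' :: repYe r := by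
  simp [repYe]

theorem repYe_cons (c : Char) (x : List Char) (hc : c ≠ 'y') :
    repYe (c :: x) = c :: repYe x := by
  match x with
  | [] => simp [repYe]
  | c2 :: r => simp [repYe, hc]

theorem repYe_cons_y (x : List Char) (hx : x.head? ≠ some 'e') :
    repYe ('y' :: x) = 'y' :: repYe x := by
  match x with
  | [] => simp [repYe]
  | c2 :: r => simp at hx; simp [repYe, hx]

theorem repWoo_tok (r : List Char) : repWoo ('w'::'o'::'o'::r) = ' ' :: repWoo r := by
  simp [repWoo]

theorem repWoo_cons (c : Char) (x : List Char) (hc : c ≠ 'w') :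
    repWoo (c :: x) = c :: repWoo x := by
  match x with
  | [] => simp [repWoo]
  | [c2] => simp [repWoo]
  | c2 :: c3 :: r => simp [repWoo, hc]

theorem repWoo_cons_w (x : List Char) (hx : ¬ (['o','o'] <+: x)) :
    repWoo ('w' :: x) = 'w' :: repWoo x := by
  match x with
  | [] => simp [repWoo]
  | [c2] => simp [repWoo]
  | c2 :: c3 :: r =>
    by_cases hc2 : c2 = 'o'
    · by_cases hc3 : c3 = 'o'
      · exact absurd (by simp [hc2, hc3, List.cons_prefix_cons]) hx
      · simp [repWoo, hc3]
    · simp [repWoo, hc2]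

theorem repMa_tok (r : List Char) : repMa ('m'::'a'::r) = ' ' :: repMa r := by
  simp [repMa]

theorem repMa_cons (c : Char) (x : List Char) (hc : c ≠ 'm') :
    repMa (c :: x) = c :: repMa x := by
  match x with
  | [] => simp [repMa]
  | c2 :: r => simp [repMa, hc]

theorem repMa_cons_m (x : List Char) (hx : x.head? ≠ some 'a') :
    repMa ('m' :: x) = 'm' :: repMa x := by
  match x with
  | [] => simp [repMa]
  | c2 :: r => simp at hx; simp [repMa, hx]

-- characters not in a token survive its replace pass
theorem mem_repWoo (c : Char) (hc1 : c ≠ 'w') (hc2 : c ≠ 'o') :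
    ∀ x : List Char, c ∈ x → c ∈ repWoo x
  | c1 :: x1 :: x2 :: r, h => by
    by_cases hw : c1 = 'w' ∧ x1 = 'o' ∧ x2 = 'o'
    · obtain ⟨e1, e2, e3⟩ := hw; subst e1 e2 e3
      rw [repWoo_tok]
      simp [hc1, hc2] at h
      exact List.mem_cons_of_mem _ (mem_repWoo c hc1 hc2 r h)
    · rw [show repWoo (c1 :: x1 :: x2 :: r) = c1 :: repWoo (x1 :: x2 :: r) by simp [repWoo, hw]]
      cases h with
      | head => exact List.mem_cons_self
      | tail _ h => exact List.mem_cons_of_mem _ (mem_repWoo c hc1 hc2 _ h)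
  | [c1], h => by simpa [repWoo] using h
  | [c1, c2], h => by simpa [repWoo] using h

theorem mem_repMa (c : Char) (hc1 : c ≠ 'm') (hc2 : c ≠ 'a') :
    ∀ x : List Char, c ∈ x → c ∈ repMa x
  | c1 :: x1 :: r, h => by
    by_cases hw : c1 = 'm' ∧ x1 = 'a'
    · obtain ⟨e1, e2⟩ := hw; subst e1 e2
      rw [repMa_tok]
      simp [hc1, hc2] at h
      exact List.mem_cons_of_mem _ (mem_repMa c hc1 hc2 r h)
    · rw [show repMa (c1 :: x1 :: r) = c1 :: repMa (x1 :: r) by simp [repMa, hw]]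
      cases h with
      | head => exact List.mem_cons_self
      | tail _ h => exact List.mem_cons_of_mem _ (mem_repMa c hc1 hc2 _ h)
  | [c1], h => by simpa [repMa] using h

-- "ya" as an infix survives the ye pass
theorem infix_ya_repYe : ∀ x : List Char, ['y','a'] <:+: x → ['y','a'] <:+: repYe x
  | c1 :: c2 :: r, h => by
    by_cases hw : c1 = 'y' ∧ c2 = 'e'
    · obtain ⟨e1, e2⟩ := hw; subst e1 e2
      rw [repYe_tok]
      rw [List.infix_cons_iff] at h
      rcases h with h | h
      · simp [List.cons_prefix_cons] at h
      · rw [List.infix_cons_iff] at h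
        rcases h with h | h
        · simp [List.cons_prefix_cons] at h
        · exact List.infix_cons (infix_ya_repYe r h)
    · rw [show repYe (c1 :: c2 :: r) = c1 :: repYe (c2 :: r) by simp [repYe, hw]]
      rw [List.infix_cons_iff] at h
      rcases h with h | h
      · simp [List.cons_prefix_cons] at h
        obtain ⟨e1, e2⟩ := h; subst e1; subst e2
        rw [repYe_cons 'a' _ (by decide)]
        exact List.IsPrefix.isInfix (by simp [List.cons_prefix_cons])
      · exact List.infix_cons (infix_ya_repYe (c2 :: r) h)
  | [c1], h => by
    exact absurd (List.IsInfix.length_le h) (by simp)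
  | [], h => by
    exact absurd (List.IsInfix.length_le h) (by simp)


theorem g0_cons_false (p : Option Char) (c : Char) (x : List Char)
    (hc : PySem.Chars.isspace c = false) : g 0 p (c :: x) = false := by
  rw [g_zero]; simp [allWs, hc]

-- ---- pass lemmas: one guarded replace pass equals one scanner level ----
theorem pass_ma : ∀ (v : List Char) (p : Option Char),
    g 1 p v = (!decide (['m','a','m','a'] <:+: v) &&
      (!(p == some 'm' && decide (['m','a'] <+: v)) &&
      g 0 (mask 'm' p) (repMa v)))
  | [], p => by simp [g, repMa, mask]
  | c :: x, p => by
    by_cases hc : PySem.Chars.isspace c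
    · have hcm : c ≠ 'm' := by rintro rfl; rw [ws_m] at hc; cases hc
      rw [g_ws _ _ _ _ hc, pass_ma x none, repMa_cons c x hcm, g_ws _ _ _ _ hc]
      have hmc : ¬ ('m' = c) := fun e => hcm e.symm
      simp [mask, List.infix_cons_iff, List.cons_prefix_cons, hmc]
    · by_cases hm : c = 'm'
      · subst hm
        match x with
        | [] =>
          rw [show repMa ['m'] = ['m'] from rfl]
          simp [g, ws_m, List.infix_cons_iff, List.cons_prefix_cons]
        | c2 :: r =>
          by_cases ha : c2 = 'a'
          · subst ha
            rw [g_ma 1 (by norm_num) p r, pass_ma r (some 'm'), repMa_tok,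
                g_ws _ _ _ _ ws_sp]
            by_cases h1 : ['m','a'] <+: r <;>
              by_cases h2 : ['m','a','m','a'] <:+: r <;>
                simp [mask, List.infix_cons_iff, List.cons_prefix_cons, h1, h2]
          · rw [g_m_false 1 p _ (by simp [ha]), repMa_cons_m _ (by simp [ha]),
                g_m_low (mask 'm' p) (repMa (c2 :: r))]
            simp
      · have hg : g 1 p (c :: x) = false := by
          by_cases h1 : c = 'a'
          · subst h1; exact g_a_low 1 (by norm_num) p x
          by_cases h2 : c = 'y'
          · subst h2; exact g_y_low 1 (by norm_num) p x
          by_cases h3 : c = 'w'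
          · subst h3; exact g_w_low 1 (by norm_num) p x
          · exact g_head_false 1 p c x (by simp [hc]) h1 h2 h3 hm
        rw [hg, repMa_cons c x hm, g0_cons_false _ c _ (by simp [hc])]
        simp


theorem repAya_head (c : Char) (x : List Char) :
    (repAya (c :: x)).head? = some ' ' ∨ (repAya (c :: x)).head? = some c := by
  match x with
  | [] => right; simp [repAya]
  | [c2] => right; simp [repAya]
  | c2 :: c3 :: r =>
    by_cases h : c = 'a' ∧ c2 = 'y' ∧ c3 = 'a'
    · left; simp [repAya, h]
    · right; simp [repAya, h]

theorem repYe_head (c : Char) (x : List Char) :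
    (repYe (c :: x)).head? = some ' ' ∨ (repYe (c :: x)).head? = some c := by
  match x with
  | [] => right; simp [repYe]
  | c2 :: r =>
    by_cases h : c = 'y' ∧ c2 = 'e'
    · left; simp [repYe, h]
    · right; simp [repYe, h]

theorem repWoo_head (c : Char) (x : List Char) :
    (repWoo (c :: x)).head? = some ' ' ∨ (repWoo (c :: x)).head? = some c := by
  match x with
  | [] => right; simp [repWoo]
  | [c2] => right; simp [repWoo]
  | c2 :: c3 :: r =>
    by_cases h : c = 'w' ∧ c2 = 'o' ∧ c3 = 'o'
    · left; simp [repWoo, h]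
    · right; simp [repWoo, h]

theorem mask_beq (h c : Char) (hne : c ≠ h) (p : Option Char) :
    (mask h p == some c) = (p == some c) := by
  match p with
  | none => rfl
  | some q =>
    by_cases hq : q = h
    · subst hq; simp [mask, Ne.symm hne]
    · simp [mask, hq]

theorem pass_woo : ∀ (v : List Char) (p : Option Char),
    g 2 p v = (!decide (['w','o','o','w','o','o'] <:+: v) &&
      (!(p == some 'w' && decide (['w','o','o'] <+: v)) &&
      g 1 (mask 'w' p) (repWoo v)))
  | [], p => by simp [g, repWoo, mask]
  | c :: x, p => by
    by_cases hc : PySem.Chars.isspace c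
    · have hcw : c ≠ 'w' := by rintro rfl; rw [ws_w] at hc; cases hc
      rw [g_ws _ _ _ _ hc, pass_woo x none, repWoo_cons c x hcw, g_ws _ _ _ _ hc]
      have hwc : ¬ ('w' = c) := fun e => hcw e.symm
      simp [mask, List.infix_cons_iff, List.cons_prefix_cons, hwc]
    · by_cases hw : c = 'w'
      · subst hw
        match x with
        | [] =>
          rw [show repWoo ['w'] = ['w'] from rfl]
          simp [g, ws_w, List.infix_cons_iff, List.cons_prefix_cons]
        | [c2] =>
          rw [show repWoo ['w', c2] = ['w', c2] from rfl]
          by_cases h2 : c2 = 'o' <;>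
            simp [g, ws_w, List.infix_cons_iff, List.cons_prefix_cons, h2]
        | c2 :: c3 :: r =>
          by_cases ho : c2 = 'o' ∧ c3 = 'o'
          · obtain ⟨e2, e3⟩ := ho; subst e2 e3
            rw [g_woo 2 (by norm_num) p r, pass_woo r (some 'w'), repWoo_tok,
                g_ws _ _ _ _ ws_sp]
            by_cases h1 : ['w','o','o'] <+: r <;>
              by_cases h2 : ['w','o','o','w','o','o'] <:+: r <;>
                simp [mask, List.infix_cons_iff, List.cons_prefix_cons, h1, h2]
          · have hx : ¬ (['o','o'] <+: (c2 :: c3 :: r)) := by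
              simp [List.cons_prefix_cons]; intro e2 e3; exact ho ⟨e2.symm, e3.symm⟩
            rw [g_w_false 2 p _ hx, repWoo_cons_w _ hx,
                g_w_low 1 (le_refl 1) (mask 'w' p) (repWoo (c2 :: c3 :: r))]
            simp
      · by_cases hm : c = 'm'
        · subst hm
          match x with
          | [] =>
            rw [show repWoo ['m'] = ['m'] from rfl]
            simp [g, ws_m, List.infix_cons_iff, List.cons_prefix_cons]
          | c2 :: r =>
            by_cases ha : c2 = 'a'
            · subst ha
              rw [g_ma 2 (by norm_num) p r, pass_woo r (some 'm'),
                  repWoo_cons 'm' _ (by decide), repWoo_cons 'a' _ (by decide),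
                  g_ma 1 (le_refl 1) (mask 'w' p) (repWoo r),
                  mask_beq 'w' 'm' (by decide) p]
              have hmm : mask 'w' (some 'm') = some 'm' := rfl
              rw [hmm]
              by_cases h2 : ['w','o','o','w','o','o'] <:+: r <;>
                simp [List.infix_cons_iff, List.cons_prefix_cons, h2]
            · rw [g_m_false 2 p _ (by simp [ha]), repWoo_cons 'm' _ (by decide)]
              have hh : (repWoo (c2 :: r)).head? ≠ some 'a' := by
                rcases repWoo_head c2 r with h | h <;> rw [h] <;> simp [ha]
              rw [g_m_false 1 (mask 'w' p) _ hh]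
              simp
        · have hg : g 2 p (c :: x) = false := by
            by_cases h1 : c = 'a'
            · subst h1; exact g_a_low 2 (by norm_num) p x
            by_cases h2 : c = 'y'
            · subst h2; exact g_y_low 2 (le_refl 2) p x
            · exact g_head_false 2 p c x (by simp [hc]) h1 h2 hw hm
          have hg' : g 1 (mask 'w' p) (repWoo (c :: x)) = false := by
            rw [repWoo_cons c x hw]
            by_cases h1 : c = 'a'
            · subst h1; exact g_a_low 1 (by norm_num) _ _
            by_cases h2 : c = 'y'
            · subst h2; exact g_y_low 1 (by norm_num) _ _
            · exact g_head_false 1 _ c _ (by simp [hc]) h1 h2 hw hm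
          rw [hg, hg']
          simp


theorem pass_ye : ∀ (v : List Char) (p : Option Char),
    g 3 p v = (!decide (['y','e','y','e'] <:+: v) &&
      (!(p == some 'y' && decide (['y','e'] <+: v)) &&
      g 2 (mask 'y' p) (repYe v)))
  | [], p => by simp [g, repYe, mask]
  | c :: x, p => by
    by_cases hc : PySem.Chars.isspace c
    · have hcy : c ≠ 'y' := by rintro rfl; rw [ws_y] at hc; cases hc
      rw [g_ws _ _ _ _ hc, pass_ye x none, repYe_cons c x hcy, g_ws _ _ _ _ hc]
      have hyc : ¬ ('y' = c) := fun e => hcy e.symm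
      simp [mask, List.infix_cons_iff, List.cons_prefix_cons, hyc]
    · by_cases hy : c = 'y'
      · subst hy
        match x with
        | [] =>
          rw [show repYe ['y'] = ['y'] from rfl]
          simp [g, ws_y, List.infix_cons_iff, List.cons_prefix_cons]
        | c2 :: r =>
          by_cases he : c2 = 'e'
          · subst he
            rw [g_ye 3 (by norm_num) p r, pass_ye r (some 'y'), repYe_tok,
                g_ws _ _ _ _ ws_sp]
            by_cases h1 : ['y','e'] <+: r <;>
              by_cases h2 : ['y','e','y','e'] <:+: r <;>
                simp [mask, List.infix_cons_iff, List.cons_prefix_cons, h1, h2]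
          · rw [g_y_false 3 p _ (by simp [he]), repYe_cons_y _ (by simp [he])]
            rw [g_y_false 2 (mask 'y' p) _ (by
              rcases repYe_head c2 r with h | h <;> rw [h] <;> simp [he])]
            simp
      · by_cases hw : c = 'w'
        · subst hw
          match x with
          | [] =>
            rw [show repYe ['w'] = ['w'] from rfl]
            simp [g, ws_w, List.infix_cons_iff, List.cons_prefix_cons]
          | [c2] =>
            rw [repYe_cons 'w' [c2] (by decide)]
            by_cases h2 : c2 = 'o' <;> subst_vars <;>
              simp [g, ws_w, repYe, List.infix_cons_iff, List.cons_prefix_cons]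
          | c2 :: c3 :: r =>
            by_cases ho : c2 = 'o' ∧ c3 = 'o'
            · obtain ⟨e2, e3⟩ := ho; subst e2 e3
              rw [g_woo 3 (by norm_num) p r, pass_ye r (some 'w'),
                  repYe_cons 'w' _ (by decide), repYe_cons 'o' _ (by decide),
                  repYe_cons 'o' _ (by decide),
                  g_woo 2 (le_refl 2) (mask 'y' p) (repYe r),
                  mask_beq 'y' 'w' (by decide) p]
              rw [show mask 'y' (some 'w') = some 'w' from rfl]
              by_cases h2 : ['y','e','y','e'] <:+: r <;>
                simp [List.infix_cons_iff, List.cons_prefix_cons, h2]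
            · have hx : ¬ (['o','o'] <+: (c2 :: c3 :: r)) := by
                simp [List.cons_prefix_cons]; intro e2 e3; exact ho ⟨e2.symm, e3.symm⟩
              rw [g_w_false 3 p _ hx, repYe_cons 'w' _ (by decide)]
              have hoo : ¬ (['o','o'] <+: repYe (c2 :: c3 :: r)) := by
                intro hp
                by_cases h2 : c2 = 'o'
                · subst h2
                  have h3 : c3 ≠ 'o' := fun e => ho ⟨rfl, e⟩
                  rw [repYe_cons 'o' _ (by decide)] at hp
                  obtain ⟨t, ht⟩ := hp
                  have hh : 'o' :: t = repYe (c3 :: r) := congrArg List.tail ht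
                  have hh' : (repYe (c3 :: r)).head? = some 'o' := by rw [← hh]; rfl
                  rcases repYe_head c3 r with h | h <;> rw [hh'] at h <;> simp at h
                  exact h3 h.symm
                · obtain ⟨t, ht⟩ := hp
                  have hh' : (repYe (c2 :: c3 :: r)).head? = some 'o' := by rw [← ht]; rfl
                  rcases repYe_head c2 (c3 :: r) with h | h <;> rw [hh'] at h <;> simp at h
                  exact h2 h.symm
              rw [g_w_false 2 (mask 'y' p) _ hoo]
              simp
        · by_cases hm : c = 'm'
          · subst hm
            match x with
            | [] =>
              rw [show repYe ['m'] = ['m'] from rfl]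
              simp [g, ws_m, List.infix_cons_iff, List.cons_prefix_cons]
            | c2 :: r =>
              by_cases ha : c2 = 'a'
              · subst ha
                rw [g_ma 3 (by norm_num) p r, pass_ye r (some 'm'),
                    repYe_cons 'm' _ (by decide), repYe_cons 'a' _ (by decide),
                    g_ma 2 (by norm_num) (mask 'y' p) (repYe r),
                    mask_beq 'y' 'm' (by decide) p]
                rw [show mask 'y' (some 'm') = some 'm' from rfl]
                by_cases h2 : ['y','e','y','e'] <:+: r <;>
                  simp [List.infix_cons_iff, List.cons_prefix_cons, h2]
              · rw [g_m_false 3 p _ (by simp [ha]), repYe_cons 'm' _ (by decide)]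
                rw [g_m_false 2 (mask 'y' p) _ (by
                  rcases repYe_head c2 r with h | h <;> rw [h] <;> simp [ha])]
                simp
          · have h1 : c ≠ 'a' ∨ True := Or.inr trivial
            have hg : g 3 p (c :: x) = false := by
              by_cases ha : c = 'a'
              · subst ha; exact g_a_low 3 (le_refl 3) p x
              · exact g_head_false 3 p c x (by simp [hc]) ha hy hw hm
            have hg' : g 2 (mask 'y' p) (repYe (c :: x)) = false := by
              rw [repYe_cons c x hy]
              by_cases ha : c = 'a'
              · subst ha; exact g_a_low 2 (by norm_num) _ _
              · exact g_head_false 2 _ c _ (by simp [hc]) ha hy hw hm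
            rw [hg, hg']
            simp


theorem pass_aya : ∀ (v : List Char) (p : Option Char),
    g 4 p v = (!decide (['a','y','a','a','y','a'] <:+: v) &&
      (!(p == some 'a' && decide (['a','y','a'] <+: v)) &&
      g 3 (mask 'a' p) (repAya v)))
  | [], p => by simp [g, repAya, mask]
  | c :: x, p => by
    by_cases hc : PySem.Chars.isspace c
    · have hca : c ≠ 'a' := by rintro rfl; rw [ws_a] at hc; cases hc
      rw [g_ws _ _ _ _ hc, pass_aya x none, repAya_cons c x hca, g_ws _ _ _ _ hc]
      have hac : ¬ ('a' = c) := fun e => hca e.symm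
      simp [mask, List.infix_cons_iff, List.cons_prefix_cons, hac]
    · by_cases hA : c = 'a'
      · subst hA
        by_cases hya : ['y','a'] <+: x
        · obtain ⟨r, hr⟩ := hya
          subst hr
          simp only [List.cons_append, List.nil_append]
          by_cases hs : ['y','a','a','y','a'] <+: r
          · obtain ⟨r3, hr3⟩ := hs
            subst hr3
            simp only [List.cons_append, List.nil_append]
            rw [g_aya 4 (le_refl 4) p _]
            rw [g_y_false 4 (some 'a') _ (by simp)]
            have hinf : ['a','y','a','a','y','a'] <:+:
                ('a' :: 'y' :: 'a' :: 'y' :: 'a' :: 'a' :: 'y' :: 'a' :: r3) :=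
              ⟨['a','y'], r3, by simp⟩
            simp [hinf]
          · rw [g_aya 4 (le_refl 4) p _, pass_aya r (some 'a'), repAya_tok,
                g_ws _ _ _ _ ws_sp]
            by_cases h1 : ['a','y','a'] <+: r <;>
              by_cases h2 : ['a','y','a','a','y','a'] <:+: r <;>
                simp [mask, List.infix_cons_iff, List.cons_prefix_cons, h1, h2, hs]
        · rw [g_a_false 4 p _ hya, repAya_cons_a _ hya,
              g_a_low 3 (le_refl 3) (mask 'a' p) (repAya x)]
          simp
      · by_cases hy : c = 'y'
        · subst hy
          match x with
          | [] =>
            rw [show repAya ['y'] = ['y'] from rfl]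
            simp [g, ws_y, List.infix_cons_iff, List.cons_prefix_cons]
          | c2 :: r =>
            by_cases he : c2 = 'e'
            · subst he
              rw [g_ye 4 (by norm_num) p r, pass_aya r (some 'y'),
                  repAya_cons 'y' _ (by decide), repAya_cons 'e' _ (by decide),
                  g_ye 3 (le_refl 3) (mask 'a' p) (repAya r),
                  mask_beq 'a' 'y' (by decide) p]
              rw [show mask 'a' (some 'y') = some 'y' from rfl]
              by_cases h2 : ['a','y','a','a','y','a'] <:+: r <;>
                simp [List.infix_cons_iff, List.cons_prefix_cons, h2]
            · rw [g_y_false 4 p _ (by simp [he]), repAya_cons 'y' _ (by decide)]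
              rw [g_y_false 3 (mask 'a' p) _ (by
                rcases repAya_head c2 r with h | h <;> rw [h] <;> simp [he])]
              simp
        · by_cases hw : c = 'w'
          · subst hw
            match x with
            | [] =>
              rw [show repAya ['w'] = ['w'] from rfl]
              simp [g, ws_w, List.infix_cons_iff, List.cons_prefix_cons]
            | [c2] =>
              rw [repAya_cons 'w' [c2] (by decide)]
              by_cases h2 : c2 = 'o' <;> subst_vars <;>
                simp [g, ws_w, repAya, List.infix_cons_iff, List.cons_prefix_cons]
            | c2 :: c3 :: r =>
              by_cases ho : c2 = 'o' ∧ c3 = 'o'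
              · obtain ⟨e2, e3⟩ := ho; subst e2 e3
                rw [g_woo 4 (by norm_num) p r, pass_aya r (some 'w'),
                    repAya_cons 'w' _ (by decide), repAya_cons 'o' _ (by decide),
                    repAya_cons 'o' _ (by decide),
                    g_woo 3 (by norm_num) (mask 'a' p) (repAya r),
                    mask_beq 'a' 'w' (by decide) p]
                rw [show mask 'a' (some 'w') = some 'w' from rfl]
                by_cases h2 : ['a','y','a','a','y','a'] <:+: r <;>
                  simp [List.infix_cons_iff, List.cons_prefix_cons, h2]
              · have hx : ¬ (['o','o'] <+: (c2 :: c3 :: r)) := by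
                  simp [List.cons_prefix_cons]; intro e2 e3; exact ho ⟨e2.symm, e3.symm⟩
                rw [g_w_false 4 p _ hx, repAya_cons 'w' _ (by decide)]
                have hoo : ¬ (['o','o'] <+: repAya (c2 :: c3 :: r)) := by
                  intro hp
                  by_cases h2 : c2 = 'o'
                  · subst h2
                    have h3 : c3 ≠ 'o' := fun e => ho ⟨rfl, e⟩
                    rw [repAya_cons 'o' _ (by decide)] at hp
                    obtain ⟨t, ht⟩ := hp
                    have hh : 'o' :: t = repAya (c3 :: r) := congrArg List.tail ht
                    have hh' : (repAya (c3 :: r)).head? = some 'o' := by rw [← hh]; rfl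
                    rcases repAya_head c3 r with h | h <;> rw [hh'] at h <;> simp at h
                    exact h3 h.symm
                  · obtain ⟨t, ht⟩ := hp
                    have hh' : (repAya (c2 :: c3 :: r)).head? = some 'o' := by rw [← ht]; rfl
                    rcases repAya_head c2 (c3 :: r) with h | h <;> rw [hh'] at h <;> simp at h
                    exact h2 h.symm
                rw [g_w_false 3 (mask 'a' p) _ hoo]
                simp
          · by_cases hm : c = 'm'
            · subst hm
              match x with
              | [] =>
                rw [show repAya ['m'] = ['m'] from rfl]
                simp [g, ws_m, List.infix_cons_iff, List.cons_prefix_cons]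
              | c2 :: r =>
                by_cases ha : c2 = 'a'
                · subst ha
                  by_cases hya : ['y','a'] <+: r
                  · obtain ⟨r2, hr⟩ := hya
                    subst hr
                    simp only [List.cons_append, List.nil_append]
                    rw [g_ma 4 (by norm_num) p _]
                    rw [g_y_false 4 (some 'm') _ (by simp)]
                    rw [repAya_cons 'm' _ (by decide), repAya_tok]
                    rw [g_m_false 3 (mask 'a' p) _ (by simp)]
                    simp
                  · rw [g_ma 4 (by norm_num) p r, pass_aya r (some 'm'),
                        repAya_cons 'm' _ (by decide), repAya_cons_a r hya,
                        g_ma 3 (by norm_num) (mask 'a' p) (repAya r),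
                        mask_beq 'a' 'm' (by decide) p]
                    rw [show mask 'a' (some 'm') = some 'm' from rfl]
                    have hs5 : ¬ (['y','a','a','y','a'] <+: r) :=
                      fun h => hya ((by decide : ['y','a'] <+: ['y','a','a','y','a']).trans h)
                    by_cases h2 : ['a','y','a','a','y','a'] <:+: r <;>
                      simp [List.infix_cons_iff, List.cons_prefix_cons, h2, hs5]
                · rw [g_m_false 4 p _ (by simp [ha]), repAya_cons 'm' _ (by decide)]
                  rw [g_m_false 3 (mask 'a' p) _ (by
                    rcases repAya_head c2 r with h | h <;> rw [h] <;> simp [ha])]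
                  simp
            · rw [g_head_false 4 p c x (by simp [hc]) hA hy hw hm,
                  repAya_cons c x hA,
                  g_head_false 3 (mask 'a' p) c _ (by simp [hc]) hA hy hw hm]
              simp


-- ---- A's guarded passes, canonically ----
def stepAya (w : List Char) : List Char :=
  if ['a','y','a','a','y','a'] <:+: w then w else repAya w
def stepYe (w : List Char) : List Char :=
  if ['y','e','y','e'] <:+: w then w else repYe w
def stepWoo (w : List Char) : List Char :=
  if ['w','o','o','w','o','o'] <:+: w then w else repWoo w
def stepMa (w : List Char) : List Char :=
  if ['m','a','m','a'] <:+: w then w else repMa w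

theorem allWs_false (c : Char) (v : List Char) (hc : c ∈ v)
    (hw : PySem.Chars.isspace c = false) : allWs v = false := by
  rw [allWs, List.all_eq_false]
  exact ⟨c, hc, by simp [hw]⟩

theorem mem_stepWoo (c : Char) (v : List Char) (hc : c ∈ v)
    (h1 : c ≠ 'w') (h2 : c ≠ 'o') : c ∈ stepWoo v := by
  rw [stepWoo]; split
  · exact hc
  · exact mem_repWoo c h1 h2 v hc

theorem mem_stepMa (c : Char) (v : List Char) (hc : c ∈ v)
    (h1 : c ≠ 'm') (h2 : c ≠ 'a') : c ∈ stepMa v := by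
  rw [stepMa]; split
  · exact hc
  · exact mem_repMa c h1 h2 v hc

-- ---- the chained equivalences ----
theorem level1 (v : List Char) : allWs (stepMa v) = g 1 none v := by
  rw [stepMa]
  by_cases h : ['m','a','m','a'] <:+: v
  · rw [if_pos h, pass_ma v none,
        allWs_false 'm' v (h.subset (by decide)) ws_m]
    simp [h]
  · rw [if_neg h, pass_ma v none, g_zero]
    simp [h, mask]

theorem level2 (v : List Char) : allWs (stepMa (stepWoo v)) = g 2 none v := by
  by_cases h : ['w','o','o','w','o','o'] <:+: v
  · have hw : 'w' ∈ stepWoo v := by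
      rw [stepWoo, if_pos h]; exact h.subset (by decide)
    rw [allWs_false 'w' _ (mem_stepMa 'w' _ hw (by decide) (by decide)) ws_w,
        pass_woo v none]
    simp [h]
  · rw [show stepWoo v = repWoo v by rw [stepWoo, if_neg h], level1 (repWoo v),
        pass_woo v none]
    simp [h, mask]

theorem level3 (v : List Char) : allWs (stepMa (stepWoo (stepYe v))) = g 3 none v := by
  by_cases h : ['y','e','y','e'] <:+: v
  · have he : 'e' ∈ stepYe v := by
      rw [stepYe, if_pos h]; exact h.subset (by decide)
    rw [allWs_false 'e' _
          (mem_stepMa 'e' _ (mem_stepWoo 'e' _ he (by decide) (by decide))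
            (by decide) (by decide)) ws_e,
        pass_ye v none]
    simp [h]
  · rw [show stepYe v = repYe v by rw [stepYe, if_neg h], level2 (repYe v),
        pass_ye v none]
    simp [h, mask]

theorem word_main (w : List Char) :
    allWs (stepMa (stepWoo (stepYe (stepAya w)))) = g 4 none w := by
  by_cases h : ['a','y','a','a','y','a'] <:+: w
  · have hya : ['y','a'] <:+: w :=
      List.IsInfix.trans (by decide : ['y','a'] <:+: ['a','y','a','a','y','a']) h
    have hya2 : ['y','a'] <:+: stepYe w := by
      rw [stepYe]; split
      · exact hya
      · exact infix_ya_repYe w hya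
    have hy : 'y' ∈ stepYe w := hya2.subset (by decide)
    rw [show stepAya w = w by rw [stepAya, if_pos h]]
    rw [allWs_false 'y' _
          (mem_stepMa 'y' _ (mem_stepWoo 'y' _ hy (by decide) (by decide))
            (by decide) (by decide)) ws_y,
        pass_aya w none]
    simp [h]
  · rw [show stepAya w = repAya w by rw [stepAya, if_neg h], level3 (repAya w),
        pass_aya w none]
    simp [h, mask]


-- ---- bridge: PySem primitives to the canonical layer ----
theorem isIn_decide (sub s : List Char) :
    PySem.Chars.isIn sub s = decide (sub <:+: s) := by
  by_cases h : sub <:+: s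
  · simp [h]; exact (PySem.Chars.isIn_iff_infix _ _).mpr h
  · simp [h]; exact (PySem.Chars.isIn_eq_false_iff _ _).mpr h

theorem replace_go_eq (old : List Char) (rep : List Char → List Char)
    (hpos : 0 < old.length)
    (hnil : rep [] = [])
    (htok : ∀ r, rep (old ++ r) = ' ' :: rep r)
    (hcons : ∀ c t, ¬ (old <+: (c :: t)) → rep (c :: t) = c :: rep t) :
    ∀ (fuel : Nat) (l acc : List Char), l.length ≤ fuel →
      PySem.Chars.replace.go old [' '] fuel l acc = acc.reverse ++ rep l
  | 0, l, acc, hl => by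
    have : l = [] := List.eq_nil_of_length_eq_zero (by omega)
    subst this
    simp [PySem.Chars.replace.go, hnil]
  | fuel + 1, [], acc, hl => by
    simp [PySem.Chars.replace.go, hnil]
  | fuel + 1, c :: t, acc, hl => by
    rw [show PySem.Chars.replace.go old [' '] (fuel + 1) (c :: t) acc =
        (if old.isPrefixOf (c :: t) = true
         then PySem.Chars.replace.go old [' '] fuel (List.drop old.length (c :: t)) ([' '].reverse ++ acc)
         else PySem.Chars.replace.go old [' '] fuel t (c :: acc)) from rfl]
    by_cases hp : old <+: (c :: t)
    · rw [if_pos (List.isPrefixOf_iff_prefix.mpr hp)]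
      obtain ⟨r, hr⟩ := hp
      rw [replace_go_eq old rep hpos hnil htok hcons fuel _ _ (by
        have h1 := congrArg List.length hr
        simp only [List.length_append, List.length_cons] at h1
        have h2 : (c :: t).length ≤ fuel + 1 := hl
        simp only [List.length_cons] at h2
        rw [← hr, List.drop_left]
        omega)]
      rw [← hr, List.drop_left, htok r]
      simp
    · rw [if_neg (by simpa using fun hx => hp (List.isPrefixOf_iff_prefix.mp hx))]
      rw [replace_go_eq old rep hpos hnil htok hcons fuel t (c :: acc) (by simp at hl; omega)]
      rw [hcons c t hp]
      simp

theorem replace_eq_rep (old : List Char) (rep : List Char → List Char)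
    (hne : old.isEmpty = false)
    (hnil : rep [] = [])
    (htok : ∀ r, rep (old ++ r) = ' ' :: rep r)
    (hcons : ∀ c t, ¬ (old <+: (c :: t)) → rep (c :: t) = c :: rep t)
    (w : List Char) : PySem.Chars.replace w old [' '] = rep w := by
  rw [PySem.Chars.replace, if_neg (by simp [hne])]
  have hpos : 0 < old.length := by
    cases old
    · simp at hne
    · simp
  simpa using replace_go_eq old rep hpos hnil htok hcons w.length w [] (le_refl _)

theorem replace_aya (w : List Char) :
    PySem.Chars.replace w ['a','y','a'] [' '] = repAya w := by
  refine replace_eq_rep _ _ rfl rfl (fun r => by simpa using repAya_tok r) (fun c t hp => ?_) w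
  by_cases hc : c = 'a'
  · subst hc
    exact repAya_cons_a t (fun h => hp (by simpa [List.cons_prefix_cons] using h))
  · exact repAya_cons c t hc

theorem replace_ye (w : List Char) :
    PySem.Chars.replace w ['y','e'] [' '] = repYe w := by
  refine replace_eq_rep _ _ rfl rfl (fun r => by simpa using repYe_tok r) (fun c t hp => ?_) w
  by_cases hc : c = 'y'
  · subst hc
    refine repYe_cons_y t (fun h => ?_)
    cases t with
    | nil => simp at h
    | cons a t' =>
      simp at h; subst h
      exact hp (by simp [List.cons_prefix_cons])
  · exact repYe_cons c t hc

theorem replace_woo (w : List Char) :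
    PySem.Chars.replace w ['w','o','o'] [' '] = repWoo w := by
  refine replace_eq_rep _ _ rfl rfl (fun r => by simpa using repWoo_tok r) (fun c t hp => ?_) w
  by_cases hc : c = 'w'
  · subst hc
    exact repWoo_cons_w t (fun h => hp (by simpa [List.cons_prefix_cons] using h))
  · exact repWoo_cons c t hc

theorem replace_ma (w : List Char) :
    PySem.Chars.replace w ['m','a'] [' '] = repMa w := by
  refine replace_eq_rep _ _ rfl rfl (fun r => by simpa using repMa_tok r) (fun c t hp => ?_) w
  by_cases hc : c = 'm'
  · subst hc
    refine repMa_cons_m t (fun h => ?_)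
    cases t with
    | nil => simp at h
    | cons a t' =>
      simp at h; subst h
      exact hp (by simp [List.cons_prefix_cons])
  · exact repMa_cons c t hc

theorem strip_nil_iff (w : List Char) : (PySem.Chars.strip w = []) ↔ allWs w = true := by
  rw [PySem.Chars.strip, PySem.Chars.rstrip, PySem.Chars.lstrip]
  rw [List.reverse_eq_nil_iff, List.dropWhile_eq_nil_iff]
  simp only [List.mem_reverse]
  rw [allWs, List.all_eq_true]
  constructor
  · intro h c hc
    rw [← List.takeWhile_append_dropWhile (p := PySem.Chars.isspace) (l := w)] at hc
    rcases List.mem_append.mp hc with hc | hc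
    · exact List.mem_takeWhile_imp hc
    · exact h c hc
  · intro h c hc
    exact h c ((List.dropWhile_sublist _).subset hc)

-- A's per-word pipeline is the canonical chain of guarded passes
theorem pipeline_eq (w : List Char) :
    List.foldl
      (fun w possible_word =>
        if PySem.Chars.isIn (possible_word ++ possible_word) w = false
        then PySem.Chars.replace w possible_word [' '] else w)
      w [['a','y','a'], ['y','e'], ['w','o','o'], ['m','a']] =
    stepMa (stepWoo (stepYe (stepAya w))) := by
  simp only [List.foldl, isIn_decide, replace_aya, replace_ye, replace_woo, replace_ma,
    List.cons_append, List.nil_append, decide_eq_false_iff_not, ite_not,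
    stepAya, stepYe, stepWoo, stepMa]


-- ---- bridge: B's index loop is the canonical scanner on the remaining suffix ----
theorem okGo_eq (w : List Char) : ∀ (i : Nat) (prev : List Char),
    (prev = [] ∨ prev = ['a','y','a'] ∨ prev = ['y','e'] ∨ prev = ['w','o','o'] ∨ prev = ['m','a']) →
    okGo w i prev = g 4 prev.head? (List.drop i w)
  | i, prev, hinv => by
    by_cases h : i < w.length
    · have hdrop : List.drop i w = w[i] :: List.drop (i+1) w := List.drop_eq_getElem_cons h
      rw [okGo, dif_pos h]
      by_cases hsp : PySem.Chars.isspace w[i]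
      · rw [if_pos hsp, okGo_eq w (i+1) [] (Or.inl rfl), hdrop, g_ws _ _ _ _ hsp]
        rfl
      · have hspf : PySem.Chars.isspace w[i] = false := by simpa using hsp
        rw [if_neg hsp]
        split
        next ht =>
          rw [toksB_get] at ht
          split_ifs at ht with ha hy hw hm
          rw [hdrop, g_head_false 4 _ _ _ hspf ha hy hw hm]
        next t ht =>
          rw [toksB_get] at ht
          split_ifs at ht with ha hy hw hm <;> cases ht
          -- token aya
          · rw [show (['a','y','a'] : List Char).length = 3 from rfl,
                PySem.List.slice_natCast_add w i 3]
            by_cases hsl : (List.drop i w).take 3 = ['a','y','a']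
            · have hexp : List.drop i w = 'a'::'y'::'a':: List.drop (i+3) w := by
                conv_lhs => rw [← List.take_append_drop 3 (List.drop i w)]
                rw [hsl, List.drop_drop]
                rfl
              by_cases hpe : (['a','y','a'] : List Char) == prev
              · have hprev : prev = ['a','y','a'] := (eq_of_beq hpe).symm
                rw [if_pos (by simp [hpe]), hexp, g_aya 4 (le_refl 4), hprev]
                simp
              · have hpe' := Bool.of_not_eq_true hpe
                rw [if_neg (by simp [hsl, hpe']),
                    okGo_eq w (i+3) ['a','y','a'] (Or.inr (Or.inl rfl)),
                    hexp, g_aya 4 (le_refl 4)]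
                rcases hinv with rfl | rfl | rfl | rfl | rfl
                · simp
                · simp at hpe
                · simp
                · simp
                · simp
            · rw [if_pos (by simp [hsl])]
              have hya : ¬ (['y','a'] <+: List.drop (i+1) w) := by
                intro hpfx; obtain ⟨tt, htt⟩ := hpfx
                apply hsl; rw [hdrop, ha, ← htt]; rfl
              rw [hdrop, ha, g_a_false 4 _ _ hya]
          -- token ye
          · rw [show (['y','e'] : List Char).length = 2 from rfl,
                PySem.List.slice_natCast_add w i 2]
            by_cases hsl : (List.drop i w).take 2 = ['y','e']
            · have hexp : List.drop i w = 'y'::'e':: List.drop (i+2) w := by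
                conv_lhs => rw [← List.take_append_drop 2 (List.drop i w)]
                rw [hsl, List.drop_drop]
                rfl
              by_cases hpe : (['y','e'] : List Char) == prev
              · have hprev : prev = ['y','e'] := (eq_of_beq hpe).symm
                rw [if_pos (by simp [hpe]), hexp, g_ye 4 (by norm_num), hprev]
                simp
              · have hpe' := Bool.of_not_eq_true hpe
                rw [if_neg (by simp [hsl, hpe']),
                    okGo_eq w (i+2) ['y','e'] (Or.inr (Or.inr (Or.inl rfl))),
                    hexp, g_ye 4 (by norm_num)]
                rcases hinv with rfl | rfl | rfl | rfl | rfl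
                · simp
                · simp
                · simp at hpe
                · simp
                · simp
            · rw [if_pos (by simp [hsl])]
              have hee : (List.drop (i+1) w).head? ≠ some 'e' := by
                intro hh
                cases hX : List.drop (i+1) w with
                | nil => rw [hX] at hh; simp at hh
                | cons z tt =>
                  rw [hX] at hh; simp at hh; subst hh
                  apply hsl; rw [hdrop, hy, hX]; rfl
              rw [hdrop, hy, g_y_false 4 _ _ hee]
          -- token woo
          · rw [show (['w','o','o'] : List Char).length = 3 from rfl,
                PySem.List.slice_natCast_add w i 3]
            by_cases hsl : (List.drop i w).take 3 = ['w','o','o']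
            · have hexp : List.drop i w = 'w'::'o'::'o':: List.drop (i+3) w := by
                conv_lhs => rw [← List.take_append_drop 3 (List.drop i w)]
                rw [hsl, List.drop_drop]
                rfl
              by_cases hpe : (['w','o','o'] : List Char) == prev
              · have hprev : prev = ['w','o','o'] := (eq_of_beq hpe).symm
                rw [if_pos (by simp [hpe]), hexp, g_woo 4 (by norm_num), hprev]
                simp
              · have hpe' := Bool.of_not_eq_true hpe
                rw [if_neg (by simp [hsl, hpe']),
                    okGo_eq w (i+3) ['w','o','o'] (Or.inr (Or.inr (Or.inr (Or.inl rfl)))),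
                    hexp, g_woo 4 (by norm_num)]
                rcases hinv with rfl | rfl | rfl | rfl | rfl
                · simp
                · simp
                · simp
                · simp at hpe
                · simp
            · rw [if_pos (by simp [hsl])]
              have hoo : ¬ (['o','o'] <+: List.drop (i+1) w) := by
                intro hpfx; obtain ⟨tt, htt⟩ := hpfx
                apply hsl; rw [hdrop, hw, ← htt]; rfl
              rw [hdrop, hw, g_w_false 4 _ _ hoo]
          -- token ma
          · rw [show (['m','a'] : List Char).length = 2 from rfl,
                PySem.List.slice_natCast_add w i 2]
            by_cases hsl : (List.drop i w).take 2 = ['m','a']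
            · have hexp : List.drop i w = 'm'::'a':: List.drop (i+2) w := by
                conv_lhs => rw [← List.take_append_drop 2 (List.drop i w)]
                rw [hsl, List.drop_drop]
                rfl
              by_cases hpe : (['m','a'] : List Char) == prev
              · have hprev : prev = ['m','a'] := (eq_of_beq hpe).symm
                rw [if_pos (by simp [hpe]), hexp, g_ma 4 (by norm_num), hprev]
                simp
              · have hpe' := Bool.of_not_eq_true hpe
                rw [if_neg (by simp [hsl, hpe']),
                    okGo_eq w (i+2) ['m','a'] (Or.inr (Or.inr (Or.inr (Or.inr rfl)))),
                    hexp, g_ma 4 (by norm_num)]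
                rcases hinv with rfl | rfl | rfl | rfl | rfl
                · simp
                · simp
                · simp
                · simp
                · simp at hpe
            · rw [if_pos (by simp [hsl])]
              have haa : (List.drop (i+1) w).head? ≠ some 'a' := by
                intro hh
                cases hX : List.drop (i+1) w with
                | nil => rw [hX] at hh; simp at hh
                | cons z tt =>
                  rw [hX] at hh; simp at hh; subst hh
                  apply hsl; rw [hdrop, hm, hX]; rfl
              rw [hdrop, hm, g_m_false 4 _ _ haa]
    · rw [okGo, dif_neg h, List.drop_eq_nil_of_le (by omega), g_nil]
  termination_by i => w.length - i
  decreasing_by all_goals omega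

-- the per-word agreement of the two ports
theorem word_bridge (acc : Int) (word : String) :
    (if PySem.Chars.strip
        (List.foldl
          (fun w possible_word =>
            if PySem.Chars.isIn (possible_word ++ possible_word) w = false
            then PySem.Chars.replace w possible_word [' '] else w)
          word.toList [['a','y','a'], ['y','e'], ['w','o','o'], ['m','a']]) = []
     then acc + 1 else acc)
      = acc + (if okGo word.toList 0 [] then 1 else 0) := by
  rw [pipeline_eq word.toList, okGo_eq word.toList 0 [] (Or.inl rfl), List.drop_zero, List.head?_nil]
  by_cases hok : g 4 none word.toList = true
  · rw [if_pos ((strip_nil_iff _).mpr (by rw [word_main]; exact hok)), if_pos hok]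
  · rw [if_neg (fun hcontra => hok (by
        rw [← word_main]; exact (strip_nil_iff _).mp hcontra)),
      if_neg hok]
    simp

-- ===== VERDICT (by name: the statement is the Claim_ definition above) =====
theorem solution_spec : Claim_equal_solution := by
  intro babbling _
  show solution babbling = solution_alt babbling
  rw [solution, solution_alt]
  exact List.foldl_ext _ _ 0 (fun acc word _ => word_bridge acc word)
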